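-- pv_equiv track=rewrite | github.com/ventvinyl/weak_espresso | interpolation/interpolation.py | find_64bit_primes_in_range
-- ===== SOURCE A (Python) =====
-- from typing import List, Tuple, Optional, Dict
--
-- def miller_rabin(n: int) -> bool:
--     """
--     tests n's primality
--     """
--     if n < 2:
--         return False
--     small_primes = (2,3,5,7,11,13,17,19,23,29,31,37)
--     for p in small_primes:
--         if n % p == 0:
--             return n == p
--     d = n - 1
--     s = 0
--     while d & 1 == 0:
--         d >>= 1
--         s += 1
--     bases = (2, 325, 9375, 28178, 450775, 9780504, 1795265022)
--     for a in bases: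
--         if a % n == 0:
--             continue
--         x = pow(a, d, n)
--         if x == 1 or x == n - 1:
--             continue
--         composite = True
--         for _ in range(s - 1):
--             x = (x * x) % n
--             if x == n - 1:
--                 composite = False
--                 break
--         if composite:
--             return False
--     return True
--
-- def find_64bit_primes_in_range(start: int, end: int, need_count: int, min_v2: int) -> List[int]:
--     found = []
--     if start % 2 == 0:
--         start += 1
--     p = start
--     while p <= end and len(found) < need_count:
--         if miller_rabin(p):
--             t = p - 1
--             cnt = 0
--             while (t & 1) == 0:
--                 t >>= 1
--                 cnt += 1
--                 if cnt >= min_v2: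
--                     break
--             if cnt >= min_v2:
--                 found.append(p)
--         p += 2
--     return found
-- ===== SOURCE B (Python) =====
-- _SMALL = (2, 3, 5, 7, 11, 13, 17, 19, 23, 29, 31, 37)
-- _BASES = (2, 325, 9375, 28178, 450775, 9780504, 1795265022)
--
--
-- def _split(d):
--     # (odd part, 2-adic valuation) of d, by recursion
--     if d != 0 and d % 2 == 0:
--         q, s = _split(d // 2)
--         return q, s + 1
--     return d, 0
--
--
-- def _try_composite(a, d, s, n):
--     # True iff base a witnesses that n is composite
--     x = pow(a, d, n)
--     if x == 1 or x == n - 1: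
--         return False
--     for _ in range(s - 1):
--         x = x * x % n
--         if x == n - 1:
--             return False
--     return True
--
--
-- def _is_prime(n):
--     # deterministic Miller-Rabin (same small primes / bases as the classic test)
--     if n < 2:
--         return False
--     hit = next((p for p in _SMALL if n % p == 0), None)
--     if hit is not None:
--         return n == hit
--     d, s = _split(n - 1)
--     return not any(_try_composite(a, d, s, n) for a in _BASES if a % n)
--
--
-- def find_64bit_primes_in_range(start, end, need_count, min_v2):
--     # A qualifying prime p is odd, so it satisfies v2(p-1) >= min_v2 iff
--     # p == 1 (mod 2**m) with m = max(min_v2, 1): step only through that class.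
--     if need_count <= 0:
--         return []
--     m = max(min_v2, 1)
--     if m >= end.bit_length():
--         # smallest qualifying prime would be 2**m + 1 > end: nothing to find
--         return []
--     M = 1 << m
--     p0 = start + (1 - start) % M  # first p >= start with p == 1 (mod M)
--     found = []
--     for p in range(p0, end + 1, M):
--         if _is_prime(p):
--             found.append(p)
--             if len(found) >= need_count:
--                 break
--     return found
-- ===== Notes on version B (the rewrite author's own statement) =====
-- stated objective: faster
-- what changed: B steps only through the residue class p == 1 (mod 2**max(min_v2,1)), where v2(p-1) >= min_v2 holds by construction (returning [] at once when 2**m > end), instead of testing every odd number and re-deriving v2 with a halving loop; its Miller-Rabin is also decomposed differently (next()-based small-prime lookup, recursive odd-part/valuation split, any() over a per-base witness helper).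
import Mathlib
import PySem

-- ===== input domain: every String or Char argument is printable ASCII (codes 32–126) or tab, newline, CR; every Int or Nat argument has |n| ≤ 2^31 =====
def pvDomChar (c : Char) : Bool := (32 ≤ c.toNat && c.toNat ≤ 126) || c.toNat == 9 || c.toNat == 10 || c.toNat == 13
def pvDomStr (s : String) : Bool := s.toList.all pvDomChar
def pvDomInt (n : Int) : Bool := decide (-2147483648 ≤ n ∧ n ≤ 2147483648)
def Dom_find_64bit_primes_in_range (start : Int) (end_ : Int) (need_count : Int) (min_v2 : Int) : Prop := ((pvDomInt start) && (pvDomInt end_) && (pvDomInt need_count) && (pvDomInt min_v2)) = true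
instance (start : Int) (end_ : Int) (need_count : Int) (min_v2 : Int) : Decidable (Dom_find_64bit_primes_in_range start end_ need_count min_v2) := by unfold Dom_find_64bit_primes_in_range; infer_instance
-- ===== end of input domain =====

-- B iterates only over the residue class p ≡ 1 (mod 2^max(min_v2,1)) instead of all odd
-- numbers, skipping the per-candidate v2 halving loop entirely (objective: faster).

-- ===== PORT A =====
-- port of Source A's miller_rabin, loop for loop

-- 'for _ in range(s - 1): x = x*x % n; if x == n-1: composite = False; break' — returns the
-- final 'composite' flag
def pvSqLoop (n : Int) : Int → Nat → Bool
  | _, 0 => true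
  | x, k+1 =>
      let x' := PySem.Int.mod (x * x) n
      if x' = n - 1 then false else pvSqLoop n x' k

-- 'for p in small_primes: if n % p == 0: return n == p' — none = fell through the loop
def pvSmallCheck (n : Int) : List Int → Option Bool
  | [] => none
  | p :: ps => if PySem.Int.mod n p = 0 then some (decide (n = p)) else pvSmallCheck n ps

-- 'while d & 1 == 0: d >>= 1; s += 1' (d >> 1 is floor division by 2; the d ≠ 0 conjunct
-- only serves termination — Python never reaches this loop with d = 0)
def pvDS (d : Int) (s : Int) : Int × Int :=
  if h : PySem.Int.band d 1 = 0 ∧ d ≠ 0 then pvDS (PySem.Int.floordiv d 2) (s + 1)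
  else (d, s)
termination_by d.natAbs
decreasing_by
  have h2 : (2 : Int) ∣ d := by
    have := PySem.Int.band_one d
    exact (PySem.Int.mod_eq_zero_iff_dvd d 2).mp (by rw [← this]; exact h.1)
  obtain ⟨k, hk⟩ := h2
  have : PySem.Int.floordiv d 2 = k := by
    rw [PySem.Int.floordiv_eq_ediv_of_pos (by omega), hk, Int.mul_ediv_cancel_left _ (by omega)]
  rw [this]
  subst hk; simp [Int.natAbs_mul]; omega

-- 'for a in bases: …' — returns False as soon as a base proves n composite
def pvBasesLoop (n : Int) (d : Int) (s : Int) : List Int → Bool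
  | [] => true
  | a :: rest =>
      if PySem.Int.mod a n = 0 then pvBasesLoop n d s rest
      else
        let x := PySem.Int.powMod a d.toNat n   -- pow(a, d, n), d ≥ 0 here
        if x = 1 ∨ x = n - 1 then pvBasesLoop n d s rest
        else if pvSqLoop n x (s - 1).toNat then false
        else pvBasesLoop n d s rest

def miller_rabin (n : Int) : Bool :=
  if n < 2 then false
  else
    match pvSmallCheck n [2, 3, 5, 7, 11, 13, 17, 19, 23, 29, 31, 37] with
    | some b => b
    | none =>
        let ds := pvDS (n - 1) 0
        pvBasesLoop n ds.1 ds.2 [2, 325, 9375, 28178, 450775, 9780504, 1795265022]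

-- 'while (t & 1) == 0: t >>= 1; cnt += 1; if cnt >= min_v2: break' — returns the final cnt
def pvV2Loop (min_v2 : Int) (t : Int) (cnt : Int) : Int :=
  if h : PySem.Int.band t 1 = 0 then
    let t' := PySem.Int.floordiv t 2   -- t >>= 1 (arithmetic shift = floor division)
    let c' := cnt + 1
    if c' ≥ min_v2 then c' else pvV2Loop min_v2 t' c'
  else cnt
termination_by t.natAbs + (min_v2 - cnt).toNat
decreasing_by
  have h2 : (2 : Int) ∣ t := by
    have := PySem.Int.band_one t
    exact (PySem.Int.mod_eq_zero_iff_dvd t 2).mp (by rw [← this]; exact h)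
  obtain ⟨k, hk⟩ := h2
  have hf : PySem.Int.floordiv t 2 = k := by
    rw [PySem.Int.floordiv_eq_ediv_of_pos (by omega), hk, Int.mul_ediv_cancel_left _ (by omega)]
  rw [hf]
  rcases eq_or_ne t 0 with rfl | ht0
  · have : k = 0 := by omega
    subst this; simp; omega
  · subst hk; simp [Int.natAbs_mul]
    have : k.natAbs ≠ 0 := by simpa using ht0
    omega

-- 'while p <= end and len(found) < need_count: …; p += 2'
def pvLoopA (end_ : Int) (need : Int) (min_v2 : Int) (p : Int) (found : List Int) : List Int :=
  if h : p ≤ end_ ∧ (found.length : Int) < need then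
    let found' :=
      if miller_rabin p then
        if pvV2Loop min_v2 (p - 1) 0 ≥ min_v2 then found ++ [p] else found
      else found
    pvLoopA end_ need min_v2 (p + 2) found'
  else found
termination_by (end_ + 1 - p).toNat
decreasing_by omega

def find_64bit_primes_in_range (start : Int) (end_ : Int) (need_count : Int) (min_v2 : Int) : List Int :=
  let start' := if PySem.Int.mod start 2 = 0 then start + 1 else start
  pvLoopA end_ need_count min_v2 start' []

-- ===== PORT B =====
-- Source B's _SMALL and _BASES tuples
def pvSmallB : List Int := [2, 3, 5, 7, 11, 13, 17, 19, 23, 29, 31, 37]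
def pvBasesB : List Int := [2, 325, 9375, 28178, 450775, 9780504, 1795265022]

-- Source B _split: '(odd part, valuation) of d, by recursion'
def pvSplit (d : Int) : Int × Int :=
  if h : d ≠ 0 ∧ PySem.Int.mod d 2 = 0 then
    let r := pvSplit (PySem.Int.floordiv d 2)
    (r.1, r.2 + 1)
  else (d, 0)
termination_by d.natAbs
decreasing_by
  have h2 : (2 : Int) ∣ d := (PySem.Int.mod_eq_zero_iff_dvd d 2).mp h.2
  obtain ⟨k, hk⟩ := h2
  have : PySem.Int.floordiv d 2 = k := by
    rw [PySem.Int.floordiv_eq_ediv_of_pos (by omega), hk, Int.mul_ediv_cancel_left _ (by omega)]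
  rw [this]
  subst hk; simp [Int.natAbs_mul]; omega

-- Source B _try_composite: the for/break body as an Option-valued fold (none = early 'return False')
def pvTryComposite (a d s n : Int) : Bool :=
  let x := PySem.Int.powMod a d.toNat n
  if x = 1 ∨ x = n - 1 then false
  else
    ((List.range (s - 1).toNat).foldl
      (fun st _ => st.bind (fun y =>
        let y' := PySem.Int.mod (y * y) n
        if y' = n - 1 then none else some y'))
      (some x)).isSome

-- Source B _is_prime: next() over the small primes, then 'not any(... for a in _BASES if a % n)'
def pvIsPrime (n : Int) : Bool :=
  if n < 2 then false
  else
    match pvSmallB.find? (fun p => PySem.Int.mod n p == 0) with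
    | some hit => decide (n = hit)
    | none =>
        let ds := pvSplit (n - 1)
        ! pvBasesB.any (fun a =>
            decide (PySem.Int.mod a n ≠ 0) && pvTryComposite a ds.1 ds.2 n)

-- 'for p in range(p0, end + 1, M): if _is_prime(p): found.append(p); if len(found) >= need_count: break'
def pvGoB (need : Int) : List Int → List Int → List Int
  | [], found => found
  | p :: rest, found =>
      if pvIsPrime p then
        let found' := found ++ [p]
        if (found'.length : Int) ≥ need then found' else pvGoB need rest found'
      else pvGoB need rest found

def find_64bit_primes_in_range_alt (start : Int) (end_ : Int) (need_count : Int) (min_v2 : Int) : List Int :=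
  if need_count ≤ 0 then []
  else
    let m := max min_v2 1
    if m ≥ (PySem.Int.bitLength end_ : Int) then []
    else
      let M : Int := 1 <<< m.toNat          -- 1 << m
      let p0 := start + PySem.Int.mod (1 - start) M
      pvGoB need_count (PySem.List.pyRange p0 (end_ + 1) M) []

-- ===== PRECONDITION & SPEC =====
def Spec_find_64bit_primes_in_range (start : Int) (end_ : Int) (need_count : Int) (min_v2 : Int) (out : List Int) : Prop := out = find_64bit_primes_in_range_alt start end_ need_count min_v2
instance (start : Int) (end_ : Int) (need_count : Int) (min_v2 : Int) (out : List Int) : Decidable (Spec_find_64bit_primes_in_range start end_ need_count min_v2 out) := by unfold Spec_find_64bit_primes_in_range; infer_instance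

-- ===== CLAIM (what is proved, stated in full; the proofs are below) =====
def Claim_equal_find_64bit_primes_in_range : Prop := ∀ (start : Int) (end_ : Int) (need_count : Int) (min_v2 : Int), Dom_find_64bit_primes_in_range start end_ need_count min_v2 → Spec_find_64bit_primes_in_range start end_ need_count min_v2 (find_64bit_primes_in_range start end_ need_count min_v2)

-- ===== LEMMAS AND PROOFS =====

-- pyRange with a positive step: nil / cons unfolding
theorem pvRange_pos_nil (a b s : Int) (hs : 0 < s) (hab : b ≤ a) :
    PySem.List.pyRange a b s = [] := by
  rw [PySem.List.pyRange_of_pos a b hs, if_neg (by omega)]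
  simp

theorem pvRange_pos_cons (a b s : Int) (hs : 0 < s) (hab : a < b) :
    PySem.List.pyRange a b s = a :: PySem.List.pyRange (a + s) b s := by
  rw [PySem.List.pyRange_of_pos a b hs, PySem.List.pyRange_of_pos (a + s) b hs, if_pos hab]
  have hq1 : (1 : Int) ≤ (b - a + s - 1) / s := by
    rw [Int.le_ediv_iff_mul_le hs, one_mul]; omega
  have hn : ((b - a + s - 1) / s).toNat =
      (if a + s < b then ((b - (a + s) + s - 1) / s).toNat else 0) + 1 := by
    split_ifs with h2
    · rw [show b - (a + s) + s - 1 = b - a - 1 by ring]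
      have e : (b - a + s - 1) / s = (b - a - 1) / s + 1 := by
        have h := Int.add_mul_ediv_right (b - a - 1) 1 (show s ≠ 0 by omega)
        rw [one_mul] at h
        rw [show b - a + s - 1 = b - a - 1 + s by ring, h]
      have hnn : 0 ≤ (b - a - 1) / s := Int.ediv_nonneg (by omega) (by omega)
      omega
    · have hq2 : (b - a + s - 1) / s < 2 := by
        rw [Int.ediv_lt_iff_lt_mul hs]; omega
      omega
  rw [hn, List.range_succ_eq_map]
  simp only [List.map_cons, List.map_map, Nat.cast_zero, mul_zero, add_zero]
  congr 1
  apply List.map_congr_left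
  intro k _
  simp [Function.comp, Nat.succ_eq_add_one]
  ring

-- ---- B's primality decomposition computes A's miller_rabin ----

-- the next()-based small-prime lookup equals A's loop
theorem pvSmallCheck_eq_find (n : Int) : ∀ (l : List Int),
    pvSmallCheck n l = (l.find? (fun p => PySem.Int.mod n p == 0)).map (fun p => decide (n = p)) := by
  intro l
  induction l with
  | nil => rfl
  | cons p ps ih =>
    by_cases h : PySem.Int.mod n p = 0
    · simp only [pvSmallCheck]
      rw [if_pos h, List.find?_cons_of_pos (h := by simp [h])]
      rfl
    · simp only [pvSmallCheck]
      rw [if_neg h, List.find?_cons_of_neg (h := by simp [h])]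
      exact ih

-- the recursive split equals A's while loop (with accumulator s)
theorem pvDS_eq_split : ∀ (d s : Int), pvDS d s = ((pvSplit d).1, s + (pvSplit d).2) := by
  intro d s
  fun_induction pvDS d s
  case case1 d s h ih =>
    have hcond : d ≠ 0 ∧ PySem.Int.mod d 2 = 0 := by
      refine ⟨h.2, ?_⟩
      have := PySem.Int.band_one d
      rw [← this]; exact h.1
    rw [ih]
    conv_rhs => rw [pvSplit, dif_pos hcond]
    dsimp only
    simp only [Prod.mk.injEq]
    exact ⟨by trivial, by ring⟩
  case case2 d s h =>
    have hcond : ¬ (d ≠ 0 ∧ PySem.Int.mod d 2 = 0) := by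
      intro hc
      have := PySem.Int.band_one d
      exact h ⟨by rw [this]; exact hc.2, hc.1⟩
    rw [pvSplit, dif_neg hcond]
    simp

-- a fold whose state is already none stays none
theorem pvFoldNone {α : Type} (f : Option Int → α → Option Int)
    (hf : ∀ a, f none a = none) : ∀ (l : List α), l.foldl f none = none := by
  intro l
  induction l with
  | nil => rfl
  | cons a l ih => rw [List.foldl_cons, hf]; exact ih

-- the Option-fold over range(k) completes iff A's square loop reports composite
theorem pvFold_eq_sqLoop (n : Int) : ∀ (k : Nat) (x : Int),
    ((List.range k).foldl
      (fun st _ => st.bind (fun y =>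
        let y' := PySem.Int.mod (y * y) n
        if y' = n - 1 then none else some y'))
      (some x)).isSome = pvSqLoop n x k := by
  intro k
  induction k with
  | zero => intro x; rfl
  | succ k ih =>
    intro x
    rw [List.range_succ_eq_map, List.foldl_cons, List.foldl_map]
    simp only [Option.bind_some]
    by_cases h : PySem.Int.mod (x * x) n = n - 1
    · rw [if_pos h]
      rw [pvFoldNone _ (fun a => rfl)]
      simp [pvSqLoop, h]
    · rw [if_neg h]
      rw [ih]
      simp [pvSqLoop, h]

-- pvTryComposite, re-expressed through A's square loop
theorem pvTry_eq (a d s n : Int) :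
    pvTryComposite a d s n =
      (if PySem.Int.powMod a d.toNat n = 1 ∨ PySem.Int.powMod a d.toNat n = n - 1 then false
       else pvSqLoop n (PySem.Int.powMod a d.toNat n) (s - 1).toNat) := by
  unfold pvTryComposite
  dsimp only
  by_cases h1 : PySem.Int.powMod a d.toNat n = 1 ∨ PySem.Int.powMod a d.toNat n = n - 1
  · rw [if_pos h1, if_pos h1]
  · rw [if_neg h1, if_neg h1]
    exact pvFold_eq_sqLoop n (s - 1).toNat (PySem.Int.powMod a d.toNat n)

-- the any() over bases equals A's bases loop
theorem pvBases_eq_any (n d s : Int) : ∀ (l : List Int),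
    pvBasesLoop n d s l =
      ! l.any (fun a => decide (PySem.Int.mod a n ≠ 0) && pvTryComposite a d s n) := by
  intro l
  induction l with
  | nil => rfl
  | cons a rest ih =>
    simp only [pvBasesLoop, List.any_cons]
    rw [pvTry_eq a d s n]
    by_cases h0 : PySem.Int.mod a n = 0
    · rw [if_pos h0]; simp [h0, ih]
    · rw [if_neg h0]
      by_cases h1 : PySem.Int.powMod a d.toNat n = 1 ∨ PySem.Int.powMod a d.toNat n = n - 1
      · rw [if_pos h1, if_pos h1]
        simp [ih]
      · rw [if_neg h1, if_neg h1]
        by_cases h2 : pvSqLoop n (PySem.Int.powMod a d.toNat n) (s - 1).toNat = true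
        · rw [if_pos h2, h2]
          simp [h0]
        · rw [if_neg h2]
          rw [Bool.not_eq_true] at h2
          rw [h2, ih]
          simp [h0]

-- the two primality tests agree
theorem pvIsPrime_eq : pvIsPrime = miller_rabin := by
  funext n
  unfold pvIsPrime miller_rabin
  by_cases hlt : n < 2
  · rw [if_pos hlt, if_pos hlt]
  · rw [if_neg hlt, if_neg hlt]
    have hA : pvSmallCheck n [2, 3, 5, 7, 11, 13, 17, 19, 23, 29, 31, 37]
        = (pvSmallB.find? (fun p => PySem.Int.mod n p == 0)).map (fun p => decide (n = p)) :=
      pvSmallCheck_eq_find n pvSmallB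
    rw [hA]
    cases hf : pvSmallB.find? (fun p => PySem.Int.mod n p == 0) with
    | some p => simp
    | none =>
      simp only [Option.map_none]
      rw [pvDS_eq_split (n - 1) 0, pvBases_eq_any]
      simp [pvBasesB, zero_add]

-- ---- outer-loop characterisations ----

-- the combined test A applies to each candidate
def pvQA (min_v2 p : Int) : Bool :=
  miller_rabin p && decide (pvV2Loop min_v2 (p - 1) 0 ≥ min_v2)

-- A's while loop collects the first (need - |found|) candidates passing pvQA
theorem pvLoopA_spec (end_ need min_v2 : Int) : ∀ (p : Int) (found : List Int),
    pvLoopA end_ need min_v2 p found =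
      found ++ (List.filter (pvQA min_v2) (PySem.List.pyRange p (end_ + 1) 2)).take
        (need - found.length).toNat := by
  intro p found
  fun_induction pvLoopA end_ need min_v2 p found
  case case1 p found h fnd ih =>
    rw [pvRange_pos_cons p (end_ + 1) 2 (by omega) (by omega), List.filter_cons]
    by_cases hq : pvQA min_v2 p = true
    · have hmr : miller_rabin p = true ∧ pvV2Loop min_v2 (p - 1) 0 ≥ min_v2 := by
        simpa [pvQA] using hq
      have hfnd : fnd = found ++ [p] := by
        simp only [fnd]; rw [dif_pos hmr.1, dif_pos hmr.2]
      rw [hfnd] at ih ⊢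
      rw [ih, if_pos hq]
      have hk : (need - (found.length : Int)).toNat =
          (need - ((found ++ [p]).length : Int)).toNat + 1 := by
        simp only [List.length_append, List.length_cons, List.length_nil]
        push_cast; omega
      rw [hk, List.take_succ_cons]
      simp
    · have hfnd : fnd = found := by
        simp only [fnd]
        split_ifs with h1 h2
        · exact absurd (by simp [pvQA, h1, h2]) hq
        · rfl
        · rfl
      rw [hfnd] at ih ⊢
      rw [ih, if_neg hq]
  case case2 p found h =>
    rcases not_and_or.mp h with h1 | h2
    · rw [pvRange_pos_nil p (end_ + 1) 2 (by omega) (by omega)]; simp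
    · have : (need - (found.length : Int)).toNat = 0 := by omega
      rw [this]; simp

-- B's for loop collects the first (need - |found|) candidates passing pvIsPrime
theorem pvGoB_spec (need : Int) : ∀ (l : List Int) (found : List Int),
    (found.length : Int) < need →
    pvGoB need l found =
      found ++ (List.filter pvIsPrime l).take (need - found.length).toNat := by
  intro l
  induction l with
  | nil => intro found hlen; simp [pvGoB]
  | cons p rest ih =>
    intro found hlen
    simp only [pvGoB, List.filter_cons]
    by_cases hmr : pvIsPrime p = true
    · rw [if_pos hmr, if_pos hmr]
      by_cases hfull : (((found ++ [p]).length : Int) ≥ need)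
      · rw [if_pos hfull]
        have h1 : (need - (found.length : Int)).toNat = 1 := by
          simp only [List.length_append, List.length_cons, List.length_nil] at hfull ⊢
          push_cast at hfull ⊢; omega
        rw [h1, List.take_succ_cons, List.take_zero]
      · rw [if_neg hfull]
        rw [ih (found ++ [p]) (by
          simp only [List.length_append, List.length_cons, List.length_nil] at hfull ⊢
          push_cast at hfull ⊢; omega)]
        have hk : (need - (found.length : Int)).toNat =
            (need - ((found ++ [p]).length : Int)).toNat + 1 := by
          simp only [List.length_append, List.length_cons, List.length_nil]
          push_cast; omega
        rw [hk, List.take_succ_cons]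
        simp
    · rw [if_neg hmr, if_neg hmr]
      exact ih found hlen

-- a + (1-a) % M is the unique x ≡ 1 (mod M) with a ≤ x < a + M
theorem pvP0_spec (a M : Int) (hM : 0 < M) :
    M ∣ (a + PySem.Int.mod (1 - a) M) - 1 ∧ a ≤ a + PySem.Int.mod (1 - a) M ∧
      a + PySem.Int.mod (1 - a) M < a + M := by
  refine ⟨?_, ?_, ?_⟩
  · have := PySem.Int.floordiv_mul_add_mod (1 - a) M
    exact ⟨-(PySem.Int.floordiv (1 - a) M), by linarith⟩
  · have := PySem.Int.mod_nonneg (1 - a) hM; omega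
  · have := PySem.Int.mod_lt (1 - a) hM; omega

theorem pvP0_unique (a M x : Int) (hM : 0 < M) (hd : M ∣ x - 1) (h1 : a ≤ x)
    (h2 : x < a + M) : x = a + PySem.Int.mod (1 - a) M := by
  obtain ⟨hd', h1', h2'⟩ := pvP0_spec a M hM
  obtain ⟨k, hk⟩ := hd
  obtain ⟨k', hk'⟩ := hd'
  have hdxy : M ∣ x - (a + PySem.Int.mod (1 - a) M) := ⟨k - k', by rw [mul_sub]; omega⟩
  have := Int.eq_zero_of_dvd_of_natAbs_lt_natAbs hdxy (by omega)
  omega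

-- the odd numbers from a that are ≡ 1 (mod M) form the M-progression from a + (1-a) % M
theorem pvFilter_prog (M : Int) (hM : 2 ≤ M) (hE : 2 ∣ M) : ∀ (n : Nat) (a b : Int),
    (b - a).toNat ≤ n → ¬ (2 ∣ a) →
    List.filter (fun p => decide (M ∣ p - 1)) (PySem.List.pyRange a b 2) =
      PySem.List.pyRange (a + PySem.Int.mod (1 - a) M) b M := by
  intro n
  induction n with
  | zero =>
    intro a b hn hodd
    obtain ⟨d1, d2, d3⟩ := pvP0_spec a M (by omega)
    rw [pvRange_pos_nil a b 2 (by omega) (by omega),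
      pvRange_pos_nil _ b M (by omega) (by omega)]
    simp
  | succ n ih =>
    intro a b hn hodd
    by_cases hab : a < b
    · rw [pvRange_pos_cons a b 2 (by omega) hab, List.filter_cons]
      by_cases hdv : M ∣ a - 1
      · rw [if_pos (by simpa using hdv)]
        have hpa : a + PySem.Int.mod (1 - a) M = a :=
          (pvP0_unique a M a (by omega) hdv le_rfl (by omega)).symm
        obtain ⟨k, hk⟩ := hdv
        have h2 : a + 2 + PySem.Int.mod (1 - (a + 2)) M = a + M :=
          (pvP0_unique (a + 2) M (a + M) (by omega) ⟨k + 1, by rw [mul_add]; omega⟩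
            (by omega) (by omega)).symm
        rw [ih (a + 2) b (by omega) (by omega), h2, hpa]
        exact (pvRange_pos_cons a b M (by omega) hab).symm
      · rw [if_neg (by simpa using hdv)]
        obtain ⟨d1, d2, d3⟩ := pvP0_spec a M (by omega)
        have key : a + PySem.Int.mod (1 - a) M = (a + 2) + PySem.Int.mod (1 - (a + 2)) M := by
          apply pvP0_unique (a + 2) M _ (by omega) d1
          · have hne : a + PySem.Int.mod (1 - a) M ≠ a := by
              intro he; exact hdv (by rw [← he]; exact d1)
            have hpodd : (2 : Int) ∣ (a + PySem.Int.mod (1 - a) M) - 1 := dvd_trans hE d1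
            omega
          · omega
        rw [ih (a + 2) b (by omega) (by omega), ← key]
    · obtain ⟨d1, d2, d3⟩ := pvP0_spec a M (by omega)
      rw [pvRange_pos_nil a b 2 (by omega) (by omega),
        pvRange_pos_nil _ b M (by omega) (by omega)]
      simp

-- pvV2Loop reaches min_v2 iff 2^(min_v2 - cnt) divides t
theorem pvV2Loop_ge_iff : ∀ (mv t c : Int), c < mv →
    (pvV2Loop mv t c ≥ mv ↔ (2 : Int) ^ (mv - c).toNat ∣ t) := by
  intro mv t c
  fun_induction pvV2Loop mv t c
  case case1 t cnt heven c' hge =>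
    intro hc
    have h2 : (2 : Int) ∣ t := by
      have := PySem.Int.band_one t
      exact (PySem.Int.mod_eq_zero_iff_dvd t 2).mp (by rw [← this]; exact heven)
    have he : (mv - cnt).toNat = 1 := by omega
    rw [he, pow_one]
    exact iff_of_true hge h2
  case case2 t cnt heven t' c' hge ih =>
    intro hc
    have h2 : (2 : Int) ∣ t := by
      have := PySem.Int.band_one t
      exact (PySem.Int.mod_eq_zero_iff_dvd t 2).mp (by rw [← this]; exact heven)
    obtain ⟨k, hk⟩ := h2
    have hf : PySem.Int.floordiv t 2 = k := by
      rw [PySem.Int.floordiv_eq_ediv_of_pos (by omega), hk,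
        Int.mul_ediv_cancel_left _ (by omega)]
    rw [ih (by omega)]
    simp only [t', c', hf, hk]
    have he : (mv - cnt).toNat = (mv - (cnt + 1)).toNat + 1 := by omega
    rw [he, pow_succ, show (2 : Int) * k = k * 2 by ring]
    exact (Int.mul_dvd_mul_iff_right (by norm_num)).symm
  case case3 t cnt hoddb =>
    intro hc
    have hodd : ¬ (2 : Int) ∣ t := fun hd =>
      hoddb (by rw [PySem.Int.band_one]; exact (PySem.Int.mod_eq_zero_iff_dvd t 2).mpr hd)
    refine iff_of_false (by omega) fun hd => hodd (dvd_trans (dvd_pow_self 2 (by omega)) hd)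

-- the v2 test, on an odd candidate, is exactly p ≡ 1 (mod 2^max(min_v2,1))
theorem pvV2_cond (mv p : Int) (hp : ¬ (2 ∣ p)) :
    (pvV2Loop mv (p - 1) 0 ≥ mv) ↔ (2 : Int) ^ (max mv 1).toNat ∣ p - 1 := by
  have heven : (2 : Int) ∣ p - 1 := by omega
  rcases le_or_gt mv 0 with h | h
  · have hL : pvV2Loop mv (p - 1) 0 ≥ mv := by
      rw [pvV2Loop]
      rw [dif_pos (by rw [PySem.Int.band_one]; exact (PySem.Int.mod_eq_zero_iff_dvd _ 2).mpr heven)]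
      simp only [ge_iff_le]
      rw [if_pos (by omega)]; omega
    have hm : (max mv 1).toNat = 1 := by omega
    rw [hm]; simpa [hL] using heven
  · have hm : (max mv 1).toNat = (mv - 0).toNat := by omega
    rw [hm, ← pvV2Loop_ge_iff mv (p - 1) 0 (by omega)]

theorem pvMR_ge_two (p : Int) (h : miller_rabin p = true) : 2 ≤ p := by
  by_contra hlt
  rw [miller_rabin, if_pos (by omega)] at h
  exact Bool.false_ne_true h

-- membership facts for a positive-step range
theorem pvMem_range (a b s x : Int) (hs : 0 < s) (hx : x ∈ PySem.List.pyRange a b s) :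
    a ≤ x ∧ x < b ∧ s ∣ x - a :=
  (PySem.List.mem_pyRange_iff_of_pos hs x).mp hx

-- when 2^m > end_, no candidate ≡ 1 (mod 2^m) in the range passes miller_rabin
theorem pvGuard_nil (end_ p0 M : Int) (hM : 2 ≤ M) (hd : M ∣ p0 - 1)
    (hbig : ∀ x : Int, 2 ≤ x → x ≤ end_ → M ∣ x - 1 → False) :
    List.filter miller_rabin (PySem.List.pyRange p0 (end_ + 1) M) = [] := by
  rw [List.filter_eq_nil_iff]
  intro x hx
  obtain ⟨h1, h2, h3⟩ := pvMem_range _ _ _ _ (by omega) hx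
  intro hmr
  have h2x := pvMR_ge_two x hmr
  have : M ∣ x - 1 := by
    have h := dvd_add h3 hd
    rwa [show x - p0 + (p0 - 1) = x - 1 by ring] at h
  exact hbig x h2x (by omega) this

-- ===== VERDICT (by name: the statement is the Claim_ definition above) =====
theorem find_64bit_primes_in_range_spec : Claim_equal_find_64bit_primes_in_range := by
  intro start end_ need mv _hdom
  unfold Spec_find_64bit_primes_in_range find_64bit_primes_in_range find_64bit_primes_in_range_alt
  dsimp only
  set mN := (max mv 1).toNat with hmN
  have hmN1 : 1 ≤ mN := by omega
  set M : Int := 2 ^ mN with hMdef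
  have hM2 : (2 : Int) ≤ M := by
    rw [hMdef]
    calc (2 : Int) = 2 ^ 1 := (pow_one 2).symm
    _ ≤ 2 ^ mN := pow_le_pow_right₀ (by norm_num) hmN1
  have hE : (2 : Int) ∣ M := hMdef ▸ dvd_pow_self 2 (by omega)
  have hMpos : (0 : Int) < M := by omega
  have hshift : (((1 <<< mN : Nat)) : Int) = M := by
    rw [Nat.one_shiftLeft, hMdef]; push_cast; ring
  rw [hshift]
  set start' := if PySem.Int.mod start 2 = 0 then start + 1 else start with hs'
  have hodd' : ¬ (2 : Int) ∣ start' := by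
    rw [hs']; split_ifs with h
    · have := (PySem.Int.mod_eq_zero_iff_dvd start 2).mp h; omega
    · have h2 : ¬ (2 : Int) ∣ start := fun hd => h ((PySem.Int.mod_eq_zero_iff_dvd start 2).mpr hd)
      omega
  rw [pvLoopA_spec]
  simp only [List.length_nil, Nat.cast_zero, sub_zero, List.nil_append]
  have hfil : List.filter (pvQA mv) (PySem.List.pyRange start' (end_ + 1) 2)
      = List.filter miller_rabin
          (PySem.List.pyRange (start' + PySem.Int.mod (1 - start') M) (end_ + 1) M) := by
    have step1 : List.filter (pvQA mv) (PySem.List.pyRange start' (end_ + 1) 2)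
        = List.filter miller_rabin
            (List.filter (fun p => decide (M ∣ p - 1)) (PySem.List.pyRange start' (end_ + 1) 2)) := by
      rw [List.filter_filter]
      apply List.filter_congr
      intro x hx
      obtain ⟨hx1, hx2, hx3⟩ := pvMem_range _ _ _ _ (by norm_num) hx
      have hxodd : ¬ (2 : Int) ∣ x := by omega
      simp only [pvQA]
      congr 1
      exact decide_eq_decide.mpr (by rw [← hmN] at *; exact pvV2_cond mv x hxodd)
    rw [step1, pvFilter_prog M hM2 hE (end_ + 1 - start').toNat start' (end_ + 1) le_rfl hodd']
  rw [hfil]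
  by_cases hneed : need ≤ 0
  · rw [if_pos hneed, Int.toNat_of_nonpos hneed]
    simp
  · rw [if_neg hneed]
    by_cases hg : (max mv 1 : Int) ≥ (PySem.Int.bitLength end_ : Int)
    · rw [if_pos hg]
      rw [pvGuard_nil end_ _ M hM2 (pvP0_spec start' M hMpos).1 ?_]
      · simp
      · intro x hx2 hxend hdvd
        have h1 : M ≤ x - 1 := Int.le_of_dvd (by omega) hdvd
        have h2 : (end_.natAbs : Int) < M := by
          rw [hMdef]
          have hb := PySem.Int.lt_two_pow_bitLength end_
          have hmono : (2 : ℕ) ^ PySem.Int.bitLength end_ ≤ 2 ^ mN :=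
            Nat.pow_le_pow_right (by norm_num) (by omega)
          exact_mod_cast lt_of_lt_of_le hb hmono
        have h3 : end_ ≤ (end_.natAbs : Int) := Int.le_natAbs
        omega
    · rw [if_neg hg]
      rw [pvGoB_spec need _ [] (by simp; omega)]
      simp only [List.length_nil, Nat.cast_zero, sub_zero, List.nil_append]
      rw [pvIsPrime_eq]
      have hpm : start' + PySem.Int.mod (1 - start') M = start + PySem.Int.mod (1 - start) M := by
        rw [hs']
        split_ifs with h
        · obtain ⟨d1, d2, d3⟩ := pvP0_spec start M hMpos
          have hev : (2 : Int) ∣ start := (PySem.Int.mod_eq_zero_iff_dvd start 2).mp h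
          have hpodd : (2 : Int) ∣ (start + PySem.Int.mod (1 - start) M) - 1 := dvd_trans hE d1
          exact (pvP0_unique (start + 1) M _ hMpos d1 (by omega) (by omega)).symm
        · rfl
      rw [hpm]
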